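-- pv_equiv track=rewrite | github.com/ananyagupta2305/mykaarma | backend/app/catalog.py | _phrase_for_tags
-- ===== SOURCE A (Python) =====
-- from typing import List, Dict, Any
--
-- TAG_PHRASES = {
--     "camera": "strong camera hardware for photos and videos",
--     "camera-ois": "OIS for stabilized shots",
--     "battery": "excellent battery life",
--     "charging": "fast charging support",
--     "display": "vibrant high-refresh display",
--     "performance": "solid performance for daily tasks and gaming",
--     "premium": "premium build and materials",
--     "budget": "great value for money",
--     "selfie": "good front camera for selfies",
--     "design": "attractive design",
--     "gaming": "tuned for gaming with good thermals",
--     "value": "excellent price-to-performance ratio",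
--     "ai": "AI-driven camera/software features",
--     "onehand": "compact and easy one-hand use",
--     "storage": "generous storage option",
--     "ram": "ample RAM for multitasking",
--     "oled": "OLED display for deep blacks",
--     "amoled": "AMOLED screen for vivid colors",
--     "midrange": "solid mid-range contender",
--     "flagship": "flagship-level specs",
--     "durable": "robust build / IP rating",
-- }
--
-- DEFAULT_PHRASES = [
--     "a balanced set of features for everyday use",
--     "good overall value",
-- ]
--
-- def _phrase_for_tags(tags: List[str]) -> str:
--     """Create a short natural-language rationale from tags."""
--     phrases = []
--     clean_tags = [t.lower().replace(" ", "-") for t in tags]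
--     priority = ["camera", "camera-ois", "battery", "charging", "performance", "display",
--                 "amoled", "oled", "ai", "gaming", "budget", "premium", "value", "design", "selfie", "onehand"]
--     for p in priority:
--         if p in clean_tags and p in TAG_PHRASES:
--             phrases.append(TAG_PHRASES[p])
--     for t in clean_tags:
--         if t in TAG_PHRASES and TAG_PHRASES[t] not in phrases:
--             phrases.append(TAG_PHRASES[t])
--     if not phrases:
--         phrases = DEFAULT_PHRASES.copy()
--     if len(phrases) == 1:
--         return f"Recommended for {phrases[0]}."
--     return f"Recommended for {phrases[0]} and {phrases[1]}."
-- ===== SOURCE B (Python) =====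
-- from typing import List
--
-- TAG_PHRASES = {
--     "camera": "strong camera hardware for photos and videos",
--     "camera-ois": "OIS for stabilized shots",
--     "battery": "excellent battery life",
--     "charging": "fast charging support",
--     "display": "vibrant high-refresh display",
--     "performance": "solid performance for daily tasks and gaming",
--     "premium": "premium build and materials",
--     "budget": "great value for money",
--     "selfie": "good front camera for selfies",
--     "design": "attractive design",
--     "gaming": "tuned for gaming with good thermals",
--     "value": "excellent price-to-performance ratio",
--     "ai": "AI-driven camera/software features",
--     "onehand": "compact and easy one-hand use",
--     "storage": "generous storage option",
--     "ram": "ample RAM for multitasking",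
--     "oled": "OLED display for deep blacks",
--     "amoled": "AMOLED screen for vivid colors",
--     "midrange": "solid mid-range contender",
--     "flagship": "flagship-level specs",
--     "durable": "robust build / IP rating",
-- }
--
-- DEFAULT_PHRASES = [
--     "a balanced set of features for everyday use",
--     "good overall value",
-- ]
--
-- _PRIORITY_RANK = {p: i for i, p in enumerate(
--     ["camera", "camera-ois", "battery", "charging", "performance", "display",
--      "amoled", "oled", "ai", "gaming", "budget", "premium", "value", "design", "selfie", "onehand"])}
--
-- def _phrase_for_tags(tags: List[str]) -> str:
--     """Create a short natural-language rationale from tags."""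
--     key = {}
--     for i, t in enumerate(t.lower().replace(" ", "-") for t in tags):
--         if t in TAG_PHRASES and t not in key:
--             key[t] = _PRIORITY_RANK.get(t, 100 + i)
--     chosen = sorted(key, key=key.get)[:2]
--     phrases = [TAG_PHRASES[t] for t in chosen] or DEFAULT_PHRASES[:2]
--     if len(phrases) == 1:
--         return f"Recommended for {phrases[0]}."
--     return f"Recommended for {phrases[0]} and {phrases[1]}."
-- ===== Notes on version B (the rewrite author's own statement) =====
-- stated objective: alternative
-- what changed: A's two sequential selection loops (a priority scan with repeated list-membership tests, then an appearance scan deduplicating via membership in the growing phrase list) are replaced by a single pass that assigns each recognized tag a numeric sort key (priority rank, or 100 + first-appearance index) into a dict, followed by one sort of at most 21 keys and taking the first two.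
import Mathlib
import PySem

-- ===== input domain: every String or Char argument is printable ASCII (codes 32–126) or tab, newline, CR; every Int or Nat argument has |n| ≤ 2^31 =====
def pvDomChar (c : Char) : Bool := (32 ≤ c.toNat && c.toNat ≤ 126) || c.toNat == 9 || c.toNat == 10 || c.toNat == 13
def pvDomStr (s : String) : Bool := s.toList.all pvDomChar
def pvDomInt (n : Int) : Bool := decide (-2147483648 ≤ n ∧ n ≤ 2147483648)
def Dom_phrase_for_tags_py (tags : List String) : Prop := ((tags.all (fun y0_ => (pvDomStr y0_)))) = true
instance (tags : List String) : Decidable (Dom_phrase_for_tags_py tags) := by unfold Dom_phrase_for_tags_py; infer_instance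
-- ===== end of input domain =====

-- B replaces A's two sequential selection loops (priority scan, then appearance scan with a
-- membership-dedup) by a single pass that assigns each recognized tag a numeric sort key
-- (priority rank, or 100 + first-appearance index) and one sort; same return value, alternative algorithm.

-- ===== PORT A =====
def pvTagPhrases : PySem.Dict String String := PySem.Dict.ofList [
  ("camera", "strong camera hardware for photos and videos"),
  ("camera-ois", "OIS for stabilized shots"),
  ("battery", "excellent battery life"),
  ("charging", "fast charging support"),
  ("display", "vibrant high-refresh display"),
  ("performance", "solid performance for daily tasks and gaming"),
  ("premium", "premium build and materials"),
  ("budget", "great value for money"),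
  ("selfie", "good front camera for selfies"),
  ("design", "attractive design"),
  ("gaming", "tuned for gaming with good thermals"),
  ("value", "excellent price-to-performance ratio"),
  ("ai", "AI-driven camera/software features"),
  ("onehand", "compact and easy one-hand use"),
  ("storage", "generous storage option"),
  ("ram", "ample RAM for multitasking"),
  ("oled", "OLED display for deep blacks"),
  ("amoled", "AMOLED screen for vivid colors"),
  ("midrange", "solid mid-range contender"),
  ("flagship", "flagship-level specs"),
  ("durable", "robust build / IP rating")]

def pvDefaultPhrases : List String :=
  ["a balanced set of features for everyday use", "good overall value"]

def pvPriority : List String :=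
  ["camera", "camera-ois", "battery", "charging", "performance", "display",
   "amoled", "oled", "ai", "gaming", "budget", "premium", "value", "design", "selfie", "onehand"]

-- t.lower().replace(" ", "-")
def pvCleanTag (t : String) : String := PySem.Str.replace (PySem.Str.lower t) " " "-"

-- TAG_PHRASES[t] is always evaluated under a `t in TAG_PHRASES` guard, so getD is exact.
def phrase_for_tags_py (tags : List String) : String :=
  let clean_tags := tags.map pvCleanTag
  let phrases : List String :=
    pvPriority.foldl (fun acc p =>
      if clean_tags.contains p && pvTagPhrases.contains p
      then acc ++ [pvTagPhrases.getD p ""] else acc) []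
  let phrases :=
    clean_tags.foldl (fun acc t =>
      if pvTagPhrases.contains t && !(acc.contains (pvTagPhrases.getD t ""))
      then acc ++ [pvTagPhrases.getD t ""] else acc) phrases
  let phrases := if phrases.isEmpty then pvDefaultPhrases else phrases
  if phrases.length = 1 then "Recommended for " ++ phrases.getD 0 "" ++ "."
  else "Recommended for " ++ phrases.getD 0 "" ++ " and " ++ phrases.getD 1 "" ++ "."

-- ===== PORT B =====
def pvPrioRank : PySem.Dict String Int := PySem.Dict.ofList [
  ("camera", 0), ("camera-ois", 1), ("battery", 2), ("charging", 3),
  ("performance", 4), ("display", 5), ("amoled", 6), ("oled", 7), ("ai", 8),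
  ("gaming", 9), ("budget", 10), ("premium", 11), ("value", 12), ("design", 13),
  ("selfie", 14), ("onehand", 15)]

-- `sorted(key, key=key.get)`: every iterated element is a key of the dict, so key.get
-- returns its stored value; getD with any default is exact there.
def phrase_for_tags_py_alt (tags : List String) : String :=
  let key : PySem.Dict String Int :=
    (PySem.List.enumerate (tags.map pvCleanTag) 0).foldl
      (fun d p =>
        if pvTagPhrases.contains p.2 && !(d.contains p.2)
        then d.insert p.2 (pvPrioRank.getD p.2 (100 + p.1)) else d)
      PySem.Dict.empty
  let chosen := (PySem.List.sorted key.keys (fun t => key.getD t 0) false).take 2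
  let phrases := chosen.map (fun t => pvTagPhrases.getD t "")
  let phrases := if phrases.isEmpty then pvDefaultPhrases.take 2 else phrases
  if phrases.length = 1 then "Recommended for " ++ phrases.getD 0 "" ++ "."
  else "Recommended for " ++ phrases.getD 0 "" ++ " and " ++ phrases.getD 1 "" ++ "."

-- ===== PRECONDITION & SPEC =====
def Spec_phrase_for_tags_py (tags : List String) (out : String) : Prop := out = phrase_for_tags_py_alt tags
instance (tags : List String) (out : String) : Decidable (Spec_phrase_for_tags_py tags out) := by unfold Spec_phrase_for_tags_py; infer_instance

-- ===== CLAIM (what is proved, stated in full; the proofs are below) =====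
def Claim_equal_phrase_for_tags_py : Prop := ∀ (tags : List String), Dom_phrase_for_tags_py tags → Spec_phrase_for_tags_py tags (phrase_for_tags_py tags)

-- ===== LEMMAS AND PROOFS =====

-- abbreviations used only by the proofs
def pvRecog (t : String) : Bool := pvTagPhrases.contains t
def pvPhrase (t : String) : String := pvTagPhrases.getD t ""
def pvRank (t : String) : Int := pvPrioRank.getD t 0

-- the dict built by B's loop
def pvKeyDict (cs : List String) : PySem.Dict String Int :=
  (PySem.List.enumerate cs 0).foldl
    (fun d p =>
      if pvTagPhrases.contains p.2 && !(d.contains p.2)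
      then d.insert p.2 (pvPrioRank.getD p.2 (100 + p.1)) else d)
    PySem.Dict.empty

-- the tags appended by A's second loop (tag level), in order
def pvSel : List String → List String → List String
  | [], _ => []
  | t :: cs, ks =>
      if pvRecog t && !ks.contains t then t :: pvSel cs (ks ++ [t]) else pvSel cs ks

-- the (tag, sort-key) pairs appended by B's dict-building loop, in order
def pvNew : List (Int × String) → List String → List (String × Int)
  | [], _ => []
  | p :: l, ks =>
      if pvRecog p.2 && !ks.contains p.2
      then (p.2, pvPrioRank.getD p.2 (100 + p.1)) :: pvNew l (ks ++ [p.2])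
      else pvNew l ks

theorem pv_prio_recog : ∀ p ∈ pvPriority, pvRecog p = true := by decide

theorem pv_prio_nodup : pvPriority.Nodup := by decide

theorem pv_prio_rank_pairwise : pvPriority.Pairwise (fun a b => pvRank a < pvRank b) := by decide

theorem pv_rank_lt_100 : ∀ p ∈ pvPriority, pvRank p < 100 := by decide

theorem pv_rank_keys : pvPrioRank.keys = pvPriority := by decide

theorem pv_phrase_inj_keys :
    ∀ s ∈ pvTagPhrases.keys, ∀ t ∈ pvTagPhrases.keys, pvPhrase s = pvPhrase t → s = t := by
  decide

theorem pv_recog_mem_keys (t : String) (h : pvRecog t = true) : t ∈ pvTagPhrases.keys :=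
  (PySem.Dict.contains_iff_mem_keys _ _).mp h

theorem pv_phrase_inj (s t : String) (hs : pvRecog s = true) (ht : pvRecog t = true)
    (h : pvPhrase s = pvPhrase t) : s = t :=
  pv_phrase_inj_keys s (pv_recog_mem_keys s hs) t (pv_recog_mem_keys t ht) h

theorem pv_sel_mem (cs : List String) : ∀ ks t,
    t ∈ pvSel cs ks ↔ pvRecog t = true ∧ t ∈ cs ∧ t ∉ ks := by
  induction cs with
  | nil => intro ks t; simp [pvSel]
  | cons c cs ih =>
    intro ks t
    by_cases h : (pvRecog c && !ks.contains c) = true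
    · have hrc : pvRecog c = true := by
        simpa using (Bool.and_eq_true _ _ |>.mp h).1
      have hkc : c ∉ ks := by
        have := (Bool.and_eq_true _ _ |>.mp h).2
        simpa [List.contains_iff_mem] using this
      rw [pvSel, if_pos h]
      simp only [List.mem_cons, ih (ks ++ [c]) t, List.mem_append]
      constructor
      · rintro (rfl | ⟨hr, hmem, hnk⟩)
        · exact ⟨hrc, Or.inl rfl, hkc⟩
        · exact ⟨hr, Or.inr hmem, fun hk => hnk (Or.inl hk)⟩
      · rintro ⟨hr, hmem, hnk⟩
        by_cases htc : t = c
        · exact Or.inl htc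
        · rcases hmem with rfl | hm
          · exact Or.inl rfl
          · exact Or.inr ⟨hr, hm, by simp [hnk, htc]⟩
    · rw [pvSel, if_neg h]
      rw [ih ks t]
      constructor
      · rintro ⟨hr, hm, hk⟩; exact ⟨hr, List.mem_cons_of_mem _ hm, hk⟩
      · rintro ⟨hr, hm, hk⟩
        rcases List.mem_cons.mp hm with rfl | hm'
        · exfalso; apply h
          simp only [Bool.and_eq_true, Bool.not_eq_true', hr, true_and]
          simp [hk]
        · exact ⟨hr, hm', hk⟩

theorem pv_sel_nodup (cs : List String) : ∀ ks, (pvSel cs ks).Nodup := by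
  induction cs with
  | nil => intro ks; simp [pvSel]
  | cons c cs ih =>
    intro ks
    by_cases h : (pvRecog c && !ks.contains c) = true
    · rw [pvSel, if_pos h]
      refine List.nodup_cons.mpr ⟨?_, ih _⟩
      intro hc
      have := ((pv_sel_mem cs (ks ++ [c]) c).mp hc).2.2
      simp at this
    · rw [pvSel, if_neg h]; exact ih ks

-- pvSel depends on ks only through membership
theorem pv_sel_congr (cs : List String) : ∀ ks ks', (∀ t, t ∈ ks ↔ t ∈ ks') →
    pvSel cs ks = pvSel cs ks' := by
  induction cs with
  | nil => intro ks ks' _; rfl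
  | cons c cs ih =>
    intro ks ks' hm
    have hc : ks.contains c = ks'.contains c := by
      by_cases h : c ∈ ks
      · rw [List.contains_iff_mem.mpr h, List.contains_iff_mem.mpr ((hm c).mp h)]
      · have h1 : ks.contains c = false := by
          rw [Bool.eq_false_iff]; intro hc; exact h (List.contains_iff_mem.mp hc)
        have h2 : ks'.contains c = false := by
          rw [Bool.eq_false_iff]; intro hc; exact h ((hm c).mpr (List.contains_iff_mem.mp hc))
        rw [h1, h2]
    rw [pvSel, pvSel, hc]
    by_cases h : (pvRecog c && !ks'.contains c) = true
    · rw [if_pos h, if_pos h]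
      rw [ih (ks ++ [c]) (ks' ++ [c]) (by intro t; simp [hm t])]
    · rw [if_neg h, if_neg h]; exact ih ks ks' hm

theorem pv_sel_prefix (cs : List String) : ∀ P ks,
    pvSel cs (P ++ ks) = (pvSel cs ks).filter (fun t => !(P.contains t)) := by
  induction cs with
  | nil => intro P ks; rfl
  | cons c cs ih =>
    intro P ks
    by_cases hk : (pvRecog c && !ks.contains c) = true
    · have hrc : pvRecog c = true := by
        simpa using (Bool.and_eq_true _ _ |>.mp hk).1
      have hkc : c ∉ ks := by
        have := (Bool.and_eq_true _ _ |>.mp hk).2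
        simpa [List.contains_iff_mem] using this
      by_cases hP : c ∈ P
      · have hcp : (P ++ ks).contains c = true :=
          List.contains_iff_mem.mpr (List.mem_append.mpr (Or.inl hP))
        have hcond : (pvRecog c && !(P ++ ks).contains c) = false := by
          rw [hcp]; simp
        rw [pvSel, pvSel, if_neg (fun h => Bool.false_ne_true (hcond.symm.trans h)), if_pos hk]
        rw [List.filter_cons_of_neg (by rw [List.contains_iff_mem.mpr hP]; simp)]
        rw [pv_sel_congr cs (P ++ ks) (P ++ (ks ++ [c])) ?_]
        · exact ih P (ks ++ [c])
        · intro t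
          simp only [List.mem_append, List.mem_singleton]
          constructor
          · tauto
          · rintro (h | h | rfl)
            · exact Or.inl h
            · exact Or.inr h
            · exact Or.inl hP
      · have hcond : (pvRecog c && !(P ++ ks).contains c) = true := by
          simp only [Bool.and_eq_true, Bool.not_eq_true']
          constructor
          · exact hrc
          · simp [hP, hkc]
        rw [pvSel, pvSel, if_pos hcond, if_pos hk]
        rw [List.filter_cons_of_pos (by
          have hPc : P.contains c = false := by
            rw [Bool.eq_false_iff]; intro hc; exact hP (List.contains_iff_mem.mp hc)
          rw [hPc]; rfl)]
        rw [List.append_assoc]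
        rw [ih P (ks ++ [c])]
    · have hcond : (pvRecog c && !(P ++ ks).contains c) = false := by
        by_cases hr : pvRecog c = true
        · have hks : c ∈ ks := by
            by_contra hnk
            have hkf : ks.contains c = false := by
              rw [Bool.eq_false_iff]; intro hc; exact hnk (List.contains_iff_mem.mp hc)
            exact hk (by rw [hr, hkf]; rfl)
          have hcc : (P ++ ks).contains c = true :=
            List.contains_iff_mem.mpr (List.mem_append.mpr (Or.inr hks))
          rw [hcc]; simp
        · rw [Bool.eq_false_iff.mpr hr]; rfl
      rw [pvSel, pvSel, if_neg (fun h => Bool.false_ne_true (hcond.symm.trans h)), if_neg hk]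
      exact ih P ks

theorem pv_loop1 (cs : List String) :
    pvPriority.foldl (fun acc p =>
      if cs.contains p && pvTagPhrases.contains p
      then acc ++ [pvTagPhrases.getD p ""] else acc) []
    = (pvPriority.filter (fun p => cs.contains p)).map pvPhrase := by
  rw [PySem.List.foldl_append_if]
  rw [List.nil_append]
  congr 1
  apply List.filter_congr
  intro a ha
  have := pv_prio_recog a ha
  simp [pvRecog] at this
  simp [this]

theorem pv_loop2 (cs : List String) : ∀ L, (∀ t ∈ L, pvRecog t = true) →
    cs.foldl (fun acc t =>
      if pvTagPhrases.contains t && !(acc.contains (pvTagPhrases.getD t ""))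
      then acc ++ [pvTagPhrases.getD t ""] else acc) (L.map pvPhrase)
    = (L ++ pvSel cs L).map pvPhrase := by
  induction cs with
  | nil => intro L _; simp [pvSel]
  | cons c cs ih =>
    intro L hL
    rw [List.foldl_cons]
    by_cases hr : pvRecog c = true
    · have hcont : (L.map pvPhrase).contains (pvTagPhrases.getD c "") = L.contains c := by
        by_cases hm : c ∈ L
        · rw [List.contains_iff_mem.mpr hm,
              List.contains_iff_mem.mpr
                (show pvTagPhrases.getD c "" ∈ L.map pvPhrase from List.mem_map.mpr ⟨c, hm, rfl⟩)]
        · have h1 : (L.map pvPhrase).contains (pvTagPhrases.getD c "") = false := by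
            rw [Bool.eq_false_iff]; intro hc
            rcases List.mem_map.mp (List.contains_iff_mem.mp hc) with ⟨u, hu, hequ⟩
            exact hm ((pv_phrase_inj u c (hL u hu) hr hequ) ▸ hu)
          have h2 : L.contains c = false := by
            rw [Bool.eq_false_iff]; intro hc; exact hm (List.contains_iff_mem.mp hc)
          rw [h1, h2]
      by_cases hm : c ∈ L
      · have hLc : L.contains c = true := List.contains_iff_mem.mpr hm
        have hfalse : (pvTagPhrases.contains c
            && !((L.map pvPhrase).contains (pvTagPhrases.getD c ""))) = false := by
          rw [hcont, hLc]; simp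
        rw [if_neg (fun h => Bool.false_ne_true (hfalse.symm.trans h))]
        rw [pvSel]
        have hcf : (pvRecog c && !L.contains c) = false := by rw [hLc]; simp
        rw [if_neg (fun h => Bool.false_ne_true (hcf.symm.trans h))]
        exact ih L hL
      · have hnLc : L.contains c = false := by
          rw [Bool.eq_false_iff]; intro hc; exact hm (List.contains_iff_mem.mp hc)
        have hico : (pvTagPhrases.contains c
            && !((L.map pvPhrase).contains (pvTagPhrases.getD c ""))) = true := by
          rw [hcont, hnLc, show pvTagPhrases.contains c = true from hr]; rfl
        rw [if_pos hico, pvSel,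
            if_pos (show (pvRecog c && !L.contains c) = true by
              rw [hnLc, show pvRecog c = true from hr]; rfl)]
        have hstep : L.map pvPhrase ++ [pvTagPhrases.getD c ""] = (L ++ [c]).map pvPhrase := by
          simp [pvPhrase]
        rw [hstep]
        rw [ih (L ++ [c]) (by intro t ht
                              rcases List.mem_append.mp ht with h | h
                              · exact hL t h
                              · simp at h; subst h; exact hr)]
        simp
    · have hrf : pvTagPhrases.contains c = false := Bool.eq_false_iff.mpr hr
      have hf : (pvTagPhrases.contains c
          && !((L.map pvPhrase).contains (pvTagPhrases.getD c ""))) = false := by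
        rw [hrf]; rfl
      rw [if_neg (fun h => Bool.false_ne_true (hf.symm.trans h))]
      rw [pvSel]
      have hcf : (pvRecog c && !L.contains c) = false := by
        rw [show pvRecog c = false from hrf]; rfl
      rw [if_neg (fun h => Bool.false_ne_true (hcf.symm.trans h))]
      exact ih L hL

theorem pv_dict_contains_keys (d : PySem.Dict String Int) (x : String) :
    d.contains x = d.keys.contains x := by
  rw [PySem.Dict.contains_eq_decide_mem_keys]
  simp

theorem pv_fold_items (l : List (Int × String)) : ∀ (d : PySem.Dict String Int),
    d.keys.Nodup →
    (l.foldl (fun d p =>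
        if pvTagPhrases.contains p.2 && !(d.contains p.2)
        then d.insert p.2 (pvPrioRank.getD p.2 (100 + p.1)) else d) d).items
      = d.items ++ pvNew l d.keys ∧
    (l.foldl (fun d p =>
        if pvTagPhrases.contains p.2 && !(d.contains p.2)
        then d.insert p.2 (pvPrioRank.getD p.2 (100 + p.1)) else d) d).keys.Nodup := by
  induction l with
  | nil => intro d hd; simp [pvNew, hd]
  | cons p l ih =>
    intro d hd
    rw [List.foldl_cons, pvNew]
    by_cases h : (pvTagPhrases.contains p.2 && !(d.contains p.2)) = true
    · have hnc : d.contains p.2 = false := by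
        have := (Bool.and_eq_true _ _ |>.mp h).2; simpa using this
      have hcond : (pvRecog p.2 && !d.keys.contains p.2) = true := by
        have := pv_dict_contains_keys d p.2
        simp only [pvRecog]
        rw [← this]; exact h
      rw [if_pos h, if_pos hcond]
      have hkeys : (d.insert p.2 (pvPrioRank.getD p.2 (100 + p.1))).keys = d.keys ++ [p.2] :=
        PySem.Dict.keys_insert_of_not_contains d _ hnc
      have hnodup : (d.insert p.2 (pvPrioRank.getD p.2 (100 + p.1))).keys.Nodup := by
        rw [hkeys]
        refine List.Nodup.append hd (List.nodup_singleton _) ?_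
        intro a ha hb
        simp at hb; subst hb
        exact absurd ((PySem.Dict.contains_iff_mem_keys _ _).mpr ha) (by simp [hnc])
      obtain ⟨hitems, hnd⟩ := ih _ hnodup
      refine ⟨?_, hnd⟩
      rw [hitems, hkeys]
      rw [PySem.Dict.items_insert_of_not_contains d _ hnc]
      simp
    · have hcond : (pvRecog p.2 && !d.keys.contains p.2) = false := by
        have := pv_dict_contains_keys d p.2
        simp only [pvRecog]
        rw [← this]; exact Bool.eq_false_iff.mpr h
      rw [if_neg h, if_neg (fun hh => Bool.false_ne_true (hcond.symm.trans hh))]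
      exact ih d hd

theorem pv_new_fst (l : List (Int × String)) : ∀ ks,
    (pvNew l ks).map Prod.fst = pvSel (l.map Prod.snd) ks := by
  induction l with
  | nil => intro ks; rfl
  | cons p l ih =>
    intro ks
    rw [pvNew, List.map_cons, pvSel]
    by_cases h : (pvRecog p.2 && !ks.contains p.2) = true
    · rw [if_pos h, if_pos h, List.map_cons, ih]
    · rw [if_neg h, if_neg h, ih]

theorem pv_new_mem (l : List (Int × String)) : ∀ ks t v, (t, v) ∈ pvNew l ks →
    pvRecog t = true ∧ ∃ i, (i, t) ∈ l ∧ v = pvPrioRank.getD t (100 + i) := by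
  induction l with
  | nil => intro ks t v h; simp [pvNew] at h
  | cons p l ih =>
    intro ks t v h
    rw [pvNew] at h
    by_cases hc : (pvRecog p.2 && !ks.contains p.2) = true
    · rw [if_pos hc] at h
      rcases List.mem_cons.mp h with heq | hm
      · have ht : t = p.2 := congrArg Prod.fst heq
        have hv : v = pvPrioRank.getD p.2 (100 + p.1) := congrArg Prod.snd heq
        subst ht
        refine ⟨by simpa using (Bool.and_eq_true _ _ |>.mp hc).1, p.1, ?_, by rw [hv]⟩
        simp
      · obtain ⟨hr, i, hi, hv⟩ := ih _ t v hm
        exact ⟨hr, i, List.mem_cons_of_mem _ hi, hv⟩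
    · rw [if_neg hc] at h
      obtain ⟨hr, i, hi, hv⟩ := ih _ t v h
      exact ⟨hr, i, List.mem_cons_of_mem _ hi, hv⟩

theorem pv_nonprio_getD (u : String) (x : Int) (h : u ∉ pvPriority) :
    pvPrioRank.getD u x = x := by
  apply PySem.Dict.getD_of_not_contains
  rw [Bool.eq_false_iff]
  intro hc
  exact h (pv_rank_keys ▸ (PySem.Dict.contains_iff_mem_keys _ _).mp hc)

theorem pv_prio_getD (u : String) (x : Int) (h : u ∈ pvPriority) :
    pvPrioRank.getD u x = pvRank u := by
  have hc : pvPrioRank.contains u = true :=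
    (PySem.Dict.contains_iff_mem_keys _ _).mpr (pv_rank_keys ▸ h)
  have := PySem.Dict.contains_eq_isSome_get? (d := pvPrioRank) (k := u)
  rw [hc] at this
  obtain ⟨r, hr⟩ := Option.isSome_iff_exists.mp this.symm
  rw [PySem.Dict.getD_of_get?_eq_some _ x hr, pvRank,
      PySem.Dict.getD_of_get?_eq_some _ 0 hr]

theorem pv_new_pairwise (l : List (Int × String)) (hl : l.Pairwise (fun p q => p.1 < q.1)) :
    ∀ ks, (pvNew l ks).Pairwise
      (fun a b => a.1 ∉ pvPriority → b.1 ∉ pvPriority → a.2 < b.2) := by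
  induction l with
  | nil => intro ks; simp [pvNew]
  | cons p l ih =>
    intro ks
    rw [List.pairwise_cons] at hl
    obtain ⟨hp, hl'⟩ := hl
    rw [pvNew]
    by_cases hc : (pvRecog p.2 && !ks.contains p.2) = true
    · rw [if_pos hc]
      refine List.pairwise_cons.mpr ⟨?_, ih hl' _⟩
      rintro ⟨u, w⟩ hb hnp hnb
      simp only at hnp hnb ⊢
      obtain ⟨_, j, hj, hw⟩ := pv_new_mem l _ u w hb
      rw [hw, pv_nonprio_getD u _ hnb, pv_nonprio_getD p.2 _ hnp]
      have := hp (j, u) hj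
      simp only at this
      omega
    · rw [if_neg hc]
      exact ih hl' _

theorem pv_enum_nonneg (cs : List String) (i : Int) (t : String)
    (h : (i, t) ∈ PySem.List.enumerate cs 0) : 0 ≤ i := by
  obtain ⟨k, hk, heq⟩ := (PySem.List.mem_enumerate_iff _ _ _).mp h
  have : i = 0 + (k : Int) := congrArg Prod.fst heq
  omega

-- characterization of B's dict
theorem pv_key_items (cs : List String) :
    (pvKeyDict cs).items = pvNew (PySem.List.enumerate cs 0) [] := by
  have h := pv_fold_items (PySem.List.enumerate cs 0) PySem.Dict.empty (by simp)
  simpa [pvKeyDict] using h.1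

theorem pv_key_keys_nodup (cs : List String) : (pvKeyDict cs).keys.Nodup := by
  have h := pv_fold_items (PySem.List.enumerate cs 0) PySem.Dict.empty (by simp)
  simpa [pvKeyDict] using h.2

theorem pv_key_keys (cs : List String) : (pvKeyDict cs).keys = pvSel cs [] := by
  have : (pvKeyDict cs).keys = (pvKeyDict cs).items.map Prod.fst := by
    simp [PySem.Dict.keys]
  rw [this, pv_key_items, pv_new_fst, PySem.List.map_snd_enumerate]

theorem pv_key_val (cs : List String) (t : String) (h : t ∈ pvSel cs []) :
    ∃ v, ((t, v) ∈ pvNew (PySem.List.enumerate cs 0) [] ∧ (pvKeyDict cs).getD t 0 = v) := by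
  have hmem : t ∈ (pvKeyDict cs).items.map Prod.fst := by
    rw [pv_key_items, pv_new_fst, PySem.List.map_snd_enumerate]; exact h
  rcases List.mem_map.mp hmem with ⟨⟨t', v⟩, hp, ht⟩
  simp only at ht; subst ht
  refine ⟨v, by rw [pv_key_items] at hp; exact hp, ?_⟩
  exact PySem.Dict.getD_of_mem_items _ hp (pv_key_keys_nodup cs) 0

theorem pv_key_val_prio (cs : List String) (t : String) (hsel : t ∈ pvSel cs [])
    (h : t ∈ pvPriority) : (pvKeyDict cs).getD t 0 = pvRank t := by
  obtain ⟨v, hv, hgd⟩ := pv_key_val cs t hsel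
  obtain ⟨_, i, _, hval⟩ := pv_new_mem _ _ t v hv
  rw [hgd, hval, pv_prio_getD t _ h]

theorem pv_key_val_nonprio (cs : List String) (t : String) (hsel : t ∈ pvSel cs [])
    (h : t ∉ pvPriority) : 100 ≤ (pvKeyDict cs).getD t 0 := by
  obtain ⟨v, hv, hgd⟩ := pv_key_val cs t hsel
  obtain ⟨_, i, hi, hval⟩ := pv_new_mem _ _ t v hv
  have h0 : (0 : Int) ≤ i := pv_enum_nonneg cs i t hi
  rw [hgd, hval, pv_nonprio_getD t _ h]
  omega

theorem pv_main (cs : List String) :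
    PySem.List.sorted (pvKeyDict cs).keys (fun t => (pvKeyDict cs).getD t 0) false
    = pvPriority.filter (fun p => cs.contains p)
      ++ pvSel cs (pvPriority.filter (fun p => cs.contains p)) := by
  set Pf := pvPriority.filter (fun p => cs.contains p) with hPf
  have hPf_mem : ∀ t, t ∈ Pf ↔ t ∈ pvPriority ∧ t ∈ cs := by
    intro t
    rw [hPf, List.mem_filter]
    simp
  have hPf_sub : ∀ t ∈ Pf, pvRecog t = true ∧ t ∈ cs := by
    intro t ht
    obtain ⟨h1, h2⟩ := (hPf_mem t).mp ht
    exact ⟨pv_prio_recog t h1, h2⟩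
  have hN_eq : pvSel cs Pf = (pvSel cs []).filter (fun t => !(Pf.contains t)) := by
    have := pv_sel_prefix cs Pf []
    simpa using this
  have hN_mem : ∀ t ∈ pvSel cs Pf, pvRecog t = true ∧ t ∈ cs ∧ t ∉ pvPriority := by
    intro t ht
    obtain ⟨hr, hm, hnk⟩ := (pv_sel_mem cs Pf t).mp ht
    refine ⟨hr, hm, fun hP => hnk ((hPf_mem t).mpr ⟨hP, hm⟩)⟩
  apply PySem.List.sorted_eq_of_perm_of_pairwise_lt
  · -- permutation
    rw [pv_key_keys]
    apply (List.perm_ext_iff_of_nodup ?_ ?_).mpr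
    · intro a
      rw [List.mem_append, pv_sel_mem cs [] a, pv_sel_mem cs Pf a]
      constructor
      · rintro (hPfa | ⟨hr, hm, _⟩)
        · obtain ⟨hr, hm⟩ := hPf_sub a hPfa
          exact ⟨hr, hm, List.not_mem_nil⟩
        · exact ⟨hr, hm, List.not_mem_nil⟩
      · rintro ⟨hr, hm, _⟩
        by_cases hP : a ∈ Pf
        · exact Or.inl hP
        · exact Or.inr ⟨hr, hm, hP⟩
    · refine (List.nodup_append).mpr ⟨?_, pv_sel_nodup cs Pf, ?_⟩
      · exact List.Nodup.filter _ pv_prio_nodup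
      · intro a ha b hb
        exact fun heq => ((pv_sel_mem cs Pf b).mp hb).2.2 (heq ▸ ha)
    · exact pv_sel_nodup cs []
  · -- pairwise strictly increasing keys
    rw [List.pairwise_append]
    refine ⟨?_, ?_, ?_⟩
    · -- within Pf
      have hpw : Pf.Pairwise (fun a b => pvRank a < pvRank b) :=
        List.Pairwise.sublist List.filter_sublist pv_prio_rank_pairwise
      refine List.Pairwise.imp_of_mem ?_ hpw
      intro a b ha hb hab
      have hsa : a ∈ pvSel cs [] := by
        obtain ⟨hr, hm⟩ := hPf_sub a ha
        exact (pv_sel_mem cs [] a).mpr ⟨hr, hm, List.not_mem_nil⟩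
      have hsb : b ∈ pvSel cs [] := by
        obtain ⟨hr, hm⟩ := hPf_sub b hb
        exact (pv_sel_mem cs [] b).mpr ⟨hr, hm, List.not_mem_nil⟩
      rw [pv_key_val_prio cs a hsa ((hPf_mem a).mp ha).1,
          pv_key_val_prio cs b hsb ((hPf_mem b).mp hb).1]
      exact hab
    · -- within N
      have hnl : (pvNew (PySem.List.enumerate cs 0) []).Pairwise
          (fun a b => a.1 ∉ pvPriority → b.1 ∉ pvPriority → a.2 < b.2) :=
        pv_new_pairwise _ (PySem.List.pairwise_lt_enumerate _ _) []
      have hnl' : (pvNew (PySem.List.enumerate cs 0) []).Pairwise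
          (fun a b => a.1 ∉ pvPriority → b.1 ∉ pvPriority →
            (pvKeyDict cs).getD a.1 0 < (pvKeyDict cs).getD b.1 0) := by
        refine List.Pairwise.imp_of_mem ?_ hnl
        rintro ⟨s, v⟩ ⟨u, w⟩ hsv huw h hns hnu
        simp only at *
        have hgs : (pvKeyDict cs).getD s 0 = v :=
          PySem.Dict.getD_of_mem_items _ (by rw [pv_key_items]; exact hsv)
            (pv_key_keys_nodup cs) 0
        have hgu : (pvKeyDict cs).getD u 0 = w :=
          PySem.Dict.getD_of_mem_items _ (by rw [pv_key_items]; exact huw)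
            (pv_key_keys_nodup cs) 0
        rw [hgs, hgu]
        exact h hns hnu
      have hmap : (pvSel cs []).Pairwise
          (fun a b => a ∉ pvPriority → b ∉ pvPriority →
            (pvKeyDict cs).getD a 0 < (pvKeyDict cs).getD b 0) := by
        have h0 : ((pvNew (PySem.List.enumerate cs 0) []).map Prod.fst).Pairwise
            (fun a b => a ∉ pvPriority → b ∉ pvPriority →
              (pvKeyDict cs).getD a 0 < (pvKeyDict cs).getD b 0) :=
          List.pairwise_map.mpr hnl'
        rw [pv_new_fst, PySem.List.map_snd_enumerate] at h0
        exact h0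
      have hsub : (pvSel cs Pf).Pairwise
          (fun a b => a ∉ pvPriority → b ∉ pvPriority →
            (pvKeyDict cs).getD a 0 < (pvKeyDict cs).getD b 0) := by
        rw [hN_eq]
        exact List.Pairwise.sublist List.filter_sublist hmap
      refine List.Pairwise.imp_of_mem ?_ hsub
      intro a b ha hb h
      exact h ((hN_mem a ha).2.2) ((hN_mem b hb).2.2)
    · -- cross
      intro a ha b hb
      obtain ⟨hra, hma⟩ := hPf_sub a ha
      have hsa : a ∈ pvSel cs [] :=
        (pv_sel_mem cs [] a).mpr ⟨hra, hma, List.not_mem_nil⟩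
      obtain ⟨hrb, hmb, hnpb⟩ := hN_mem b hb
      have hsb : b ∈ pvSel cs [] :=
        (pv_sel_mem cs [] b).mpr ⟨hrb, hmb, List.not_mem_nil⟩
      rw [pv_key_val_prio cs a hsa ((hPf_mem a).mp ha).1]
      have h100 := pv_key_val_nonprio cs b hsb hnpb
      have := pv_rank_lt_100 a ((hPf_mem a).mp ha).1
      omega

theorem pv_take_map (l : List String) : (l.take 2).map pvPhrase = (l.map pvPhrase).take 2 := by
  simp [List.map_take]

-- ===== VERDICT (by name: the statement is the Claim_ definition above) =====
theorem phrase_for_tags_py_spec : Claim_equal_phrase_for_tags_py := by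
  intro tags _
  unfold Spec_phrase_for_tags_py phrase_for_tags_py phrase_for_tags_py_alt
  set cs := tags.map pvCleanTag with hcs
  set Pf := pvPriority.filter (fun p => cs.contains p) with hPf
  have hkd : (PySem.List.enumerate cs 0).foldl
      (fun d p =>
        if pvTagPhrases.contains p.2 && !(d.contains p.2)
        then d.insert p.2 (pvPrioRank.getD p.2 (100 + p.1)) else d)
      PySem.Dict.empty = pvKeyDict cs := rfl
  have h1 := pv_loop1 cs
  have h2 := pv_loop2 cs Pf (fun t ht => (pv_prio_recog t (List.mem_filter.mp ht).1))
  have h3 := pv_main cs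
  simp only [hkd, h3, ← hPf]
  rw [h1, ← hPf, h2]
  rw [show (fun t => pvTagPhrases.getD t "") = pvPhrase from rfl]
  rw [pv_take_map]
  generalize List.map pvPhrase (Pf ++ pvSel cs Pf) = F
  match F with
  | [] => rfl
  | [a] => rfl
  | a :: b :: r =>
      simp [List.take, List.isEmpty, List.length, List.getD]
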